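-- pv_equiv track=rewrite | github.com/40gilad/RefundApp | RefundApp/DataProcessAndPythonController/PdfProcessor/text_manipulation.py | listify_each_record
-- ===== SOURCE A (Python) =====
-- def listify_each_record(text):
--     listed = list()
--     for l in text.split("\n"):
--         try:
--             if l[0] == '1':
--                 listed.append(l)
--         except IndexError:
--             return listed
--     return listed
-- ===== SOURCE B (Python) =====
-- def listify_each_record(text):
--     line, sep, rest = text.partition("\n")
--     if line == "":
--         return []
--     tail = listify_each_record(rest) if sep else []
--     return [line] + tail if line[0] == '1' else tail
-- ===== Notes on version B (the rewrite author's own statement) =====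
-- stated objective: alternative
-- what changed: Replaces A's loop over the list of split lines with try/except IndexError early-return by a self-recursive descent on the raw string via str.partition: peel one line at the first newline, stop on an empty line or a missing separator, and cons the kept line onto the recursive result.
import Mathlib
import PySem

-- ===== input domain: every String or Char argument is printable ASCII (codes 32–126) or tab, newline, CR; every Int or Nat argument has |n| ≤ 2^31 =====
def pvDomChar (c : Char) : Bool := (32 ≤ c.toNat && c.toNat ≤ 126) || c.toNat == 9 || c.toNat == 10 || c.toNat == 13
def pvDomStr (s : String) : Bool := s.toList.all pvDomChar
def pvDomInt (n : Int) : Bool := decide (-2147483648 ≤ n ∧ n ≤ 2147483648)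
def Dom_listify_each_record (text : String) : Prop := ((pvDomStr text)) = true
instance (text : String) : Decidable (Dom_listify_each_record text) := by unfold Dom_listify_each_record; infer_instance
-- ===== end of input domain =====

-- B replaces A's loop over text.split("\n") with try/except early-return by a
-- self-recursive descent on the raw string via str.partition("\n") (alternative decomposition, same cost).

-- ===== PORT A =====
-- the for-loop with its accumulator; 'none' from l[0] is the IndexError branch (early return)
def pvLoopA : List String → List String → List String
  | acc, [] => acc
  | acc, l :: rest =>
    match PySem.Str.pyGet? l 0 with
    | none => acc
    | some c => pvLoopA (if c == '1' then acc ++ [l] else acc) rest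

def listify_each_record (text : String) : List String :=
  pvLoopA [] (((PySem.Str.split? text "\n").getD []))

-- ===== PORT B =====
-- Source B's recursion on the string; text.partition("\n") is ported by hand (exact):
-- first occurrence via PySem.Chars.find, line = take, rest = drop past the separator;
-- find = -1 is Python's sep == "" case (no recursion, tail = []).
def pvGoB (s : List Char) : List String :=
  if hfind : PySem.Chars.find s ['\n'] = -1 then
    -- partition found no "\n": line = s, sep = "" so tail = []
    if s = [] then []
    else if PySem.List.pyGet? s 0 == some '1' then [String.ofList s] else []
  else
    -- line = s[:i], sep = "\n", rest = s[i+1:]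
    let i := (PySem.Chars.find s ['\n']).toNat
    if s.take i = [] then []
    else if PySem.List.pyGet? (s.take i) 0 == some '1'
      then String.ofList (s.take i) :: pvGoB (s.drop (i + 1))
      else pvGoB (s.drop (i + 1))
termination_by s.length
decreasing_by
  all_goals
    have hin : ['\n'] <:+: s := (PySem.Chars.find_ne_neg_one_iff s ['\n']).mp hfind
    have hne : s ≠ [] := by
      intro hs; subst hs
      simpa using hin.sublist.length_le
    have : 0 < s.length := List.length_pos_iff.mpr hne
    simp only [List.length_drop]
    omega

def listify_each_record_alt (text : String) : List String :=
  pvGoB text.toList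

-- ===== PRECONDITION & SPEC =====
def Spec_listify_each_record (text : String) (out : List String) : Prop := out = listify_each_record_alt text
instance (text : String) (out : List String) : Decidable (Spec_listify_each_record text out) := by unfold Spec_listify_each_record; infer_instance

-- ===== CLAIM =====
def Claim_equal_listify_each_record : Prop := ∀ (text : String), Dom_listify_each_record text → Spec_listify_each_record text (listify_each_record text)

-- ===== LEMMAS AND PROOFS =====

-- structural version of splitting on '\n'
def pvSplit : List Char → List (List Char)
  | [] => [[]]
  | c :: rest => if c = '\n' then [] :: pvSplit rest else (pvSplit rest).modifyHead (c :: ·)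

def pvConsHead (p : List Char) : List (List Char) → List (List Char)
  | [] => [p]
  | x :: xs => (p ++ x) :: xs

theorem pvSplit_ne_nil (s : List Char) : pvSplit s ≠ [] := by
  induction s with
  | nil => simp [pvSplit]
  | cons c rest ih =>
    by_cases hc : c = '\n' <;> simp [pvSplit, hc]
    intro hmod
    exact ih (by simpa using congrArg List.length hmod)

theorem pvConsHead_nil (m : List (List Char)) (hm : m ≠ []) : pvConsHead [] m = m := by
  cases m with
  | nil => exact absurd rfl hm
  | cons x xs => simp [pvConsHead]

theorem pvGo_eq (fuel : Nat) : ∀ (l cur : List Char) (acc : List (List Char)), l.length ≤ fuel →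
    PySem.Chars.splitOn.go ['\n'] fuel l cur acc = acc.reverse ++ pvConsHead cur.reverse (pvSplit l) := by
  induction fuel with
  | zero =>
    intro l cur acc hl
    have : l = [] := List.length_eq_zero_iff.mp (Nat.le_zero.mp hl)
    subst this
    simp [PySem.Chars.splitOn.go, pvSplit, pvConsHead]
  | succ f ih =>
    intro l cur acc hl
    cases l with
    | nil => simp [PySem.Chars.splitOn.go, pvSplit, pvConsHead]
    | cons c rest =>
      by_cases hc : c = '\n'
      · subst hc
        rw [show PySem.Chars.splitOn.go ['\n'] (f+1) ('\n' :: rest) cur acc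
            = PySem.Chars.splitOn.go ['\n'] f rest [] (cur.reverse :: acc) by
          simp [PySem.Chars.splitOn.go, List.isPrefixOf]]
        rw [ih rest [] (cur.reverse :: acc) (by simpa using Nat.lt_succ_iff.mp (by simpa using hl))]
        simp only [List.reverse_nil]
        rw [pvConsHead_nil _ (pvSplit_ne_nil rest)]
        simp [pvSplit, pvConsHead]
      · have hc' : ¬('\n' = c) := fun h => hc h.symm
        rw [show PySem.Chars.splitOn.go ['\n'] (f+1) (c :: rest) cur acc
            = PySem.Chars.splitOn.go ['\n'] f rest (c :: cur) acc by
          simp [PySem.Chars.splitOn.go, List.isPrefixOf, hc']]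
        rw [ih rest (c :: cur) acc (by simpa using Nat.lt_succ_iff.mp (by simpa using hl))]
        obtain ⟨x, xs, hx⟩ := List.exists_cons_of_ne_nil (pvSplit_ne_nil rest)
        simp [pvSplit, hc, hx, pvConsHead]

theorem pvSplitOn_eq (s : List Char) : PySem.Chars.splitOn s ['\n'] = pvSplit s := by
  unfold PySem.Chars.splitOn
  rw [pvGo_eq (s.length+1) s [] [] (by omega)]
  simp [pvConsHead_nil _ (pvSplit_ne_nil s)]

theorem pvLoopA_eq (ls : List String) : ∀ acc : List String,
    pvLoopA acc ls = acc ++ (ls.takeWhile (fun l => l ≠ "")).filter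
      (fun l => PySem.Str.pyGet? l 0 == some '1') := by
  induction ls with
  | nil => intro acc; simp [pvLoopA]
  | cons l rest ih =>
    intro acc
    by_cases hl : l = ""
    · subst hl
      simp [pvLoopA, PySem.Str.pyGet?, PySem.Chars.pyGet?, PySem.List.pyGet?]
    · have hne : l.toList ≠ [] := by intro h; apply hl; simp_all
      obtain ⟨c, cs, hcs⟩ := List.exists_cons_of_ne_nil hne
      have hgetL : PySem.List.pyGet? l.toList 0 = some c := by
        rw [hcs]; exact PySem.List.pyGet?_zero_cons ..
      have hget : PySem.Str.pyGet? l 0 = some c := by simp [hgetL]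
      simp only [pvLoopA, hget]
      rw [ih]
      by_cases hc : c = '1'
      · simp [hl, hgetL, hc]
      · simp [hl, hgetL, hc]

-- singleton-prefix ↔ first element
theorem pvSingleton_prefix (a : Char) (l : List Char) : [a] <+: l ↔ l[0]? = some a := by
  cases l with
  | nil => simp
  | cons x xs => simp [List.cons_prefix_iff]

-- find s ['\n'] = -1 exactly when s has no newline
theorem pvFind_neg_iff (s : List Char) : PySem.Chars.find s ['\n'] = -1 ↔ '\n' ∉ s := by
  rw [PySem.Chars.find_eq_neg_one_iff]
  constructor
  · intro h hm
    obtain ⟨l₁, l₂, rfl⟩ := List.append_of_mem hm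
    exact h ⟨l₁, l₂, by simp⟩
  · intro h hinf
    exact h (List.singleton_sublist.mp hinf.sublist)

theorem pvDropWhile_eq (s : List Char) :
    s.dropWhile (· ≠ '\n') = s.drop (s.takeWhile (· ≠ '\n')).length := by
  have h := List.takeWhile_append_dropWhile (p := (· ≠ '\n')) (l := s)
  calc s.dropWhile (· ≠ '\n')
      = ((s.takeWhile (· ≠ '\n')) ++ s.dropWhile (· ≠ '\n')).drop (s.takeWhile (· ≠ '\n')).length :=
        List.drop_left.symm
    _ = s.drop (s.takeWhile (· ≠ '\n')).length := by rw [h]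

-- when '\n' ∈ s, find points at the end of the '\n'-free prefix
theorem pvFind_toNat (s : List Char) (hm : '\n' ∈ s) :
    (PySem.Chars.find s ['\n']).toNat = (s.takeWhile (· ≠ '\n')).length := by
  have hinf : ['\n'] <:+: s := by
    obtain ⟨l₁, l₂, rfl⟩ := List.append_of_mem hm
    exact ⟨l₁, l₂, by simp⟩
  have hnn : 0 ≤ PySem.Chars.find s ['\n'] := (PySem.Chars.find_nonneg_iff s ['\n']).mpr hinf
  obtain ⟨hpre, hmin⟩ := PySem.Chars.find_spec (s := s) (sub := ['\n']) hnn
  set j := (PySem.Chars.find s ['\n']).toNat with hj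
  set t := s.takeWhile (· ≠ '\n') with ht
  have hts : t <+: s := List.takeWhile_prefix _
  have hsj : s[j]? = some '\n' := by
    have := (pvSingleton_prefix '\n' (s.drop j)).mp hpre
    simpa [List.getElem?_drop] using this
  have h1 : t.length ≤ j := by
    by_contra hlt
    push_neg at hlt
    have hjs : j < s.length := lt_of_lt_of_le hlt hts.length_le
    have hsval : s[j] = '\n' := by
      have := hsj; rwa [List.getElem?_eq_getElem hjs, Option.some_inj] at this
    have htval : t[j] = '\n' := (hts.getElem hlt).trans hsval
    have : '\n' ∈ t := htval ▸ List.getElem_mem hlt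
    have := List.mem_takeWhile_imp this
    simp at this
  have hdne : s.dropWhile (· ≠ '\n') ≠ [] := by
    intro hnil
    have := List.dropWhile_eq_nil_iff.mp hnil '\n' hm
    simp at this
  have h2 : j ≤ t.length := by
    by_contra hgt
    push_neg at hgt
    apply hmin t.length hgt
    rw [pvSingleton_prefix, ht, ← pvDropWhile_eq]
    have hh := List.head_dropWhile_not (fun c => decide (c ≠ '\n')) hdne
    have hh' := not_not.mp (of_decide_eq_false hh)
    rw [List.getElem?_eq_getElem (by simpa using List.length_pos_iff.mpr hdne)]
    rw [← List.head_eq_getElem hdne]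
    exact congrArg some hh'
  omega

theorem pvSplit_no (s : List Char) (hm : '\n' ∉ s) : pvSplit s = [s] := by
  induction s with
  | nil => simp [pvSplit]
  | cons c rest ih =>
    have hc : c ≠ '\n' := fun h => hm (h ▸ List.mem_cons_self)
    have hr : '\n' ∉ rest := fun h => hm (List.mem_cons_of_mem _ h)
    simp [pvSplit, hc, ih hr]

theorem pvSplit_decomp (s : List Char) (hm : '\n' ∈ s) :
    pvSplit s = s.takeWhile (· ≠ '\n') :: pvSplit ((s.dropWhile (· ≠ '\n')).tail) := by
  induction s with
  | nil => simp at hm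
  | cons c rest ih =>
    by_cases hc : c = '\n'
    · subst hc; simp [pvSplit]
    · have hr : '\n' ∈ rest := by
        rcases List.mem_cons.mp hm with h | h
        · exact absurd h.symm hc
        · exact h
      simp [pvSplit, hc, ih hr]

theorem pvOfList_ne_empty (l : List Char) (h : l ≠ []) : String.ofList l ≠ "" := by
  intro he
  exact h (by simpa using congrArg String.toList he)

theorem pvGoB_eq_aux : ∀ (n : Nat) (s : List Char), s.length ≤ n →
    pvGoB s = (((pvSplit s).map String.ofList).takeWhile (fun l => l ≠ "")).filter
      (fun l => PySem.Str.pyGet? l 0 == some '1') := by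
  intro n
  induction n with
  | zero =>
    intro s hs
    have : s = [] := List.length_eq_zero_iff.mp (Nat.le_zero.mp hs)
    subst this
    have hfind : PySem.Chars.find [] ['\n'] = -1 := by
      rw [PySem.Chars.find_eq_neg_one_iff]
      intro h
      simpa using h.sublist.length_le
    rw [pvGoB, dif_pos hfind]
    simp [pvSplit]
  | succ n ih =>
    intro s hs
    by_cases hm : '\n' ∈ s
    · have hfind : ¬(PySem.Chars.find s ['\n'] = -1) := fun h => ((pvFind_neg_iff s).mp h) hm
      have hi : (PySem.Chars.find s ['\n']).toNat = (s.takeWhile (· ≠ '\n')).length :=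
        pvFind_toNat s hm
      have htake : s.take (PySem.Chars.find s ['\n']).toNat = s.takeWhile (· ≠ '\n') := by
        rw [hi]
        exact (List.prefix_iff_eq_take.mp (List.takeWhile_prefix _)).symm
      have hdrop : s.drop ((PySem.Chars.find s ['\n']).toNat + 1) = (s.dropWhile (· ≠ '\n')).tail := by
        rw [hi, ← List.tail_drop, ← pvDropWhile_eq]
      rw [pvGoB, dif_neg hfind]
      simp only [htake, hdrop]
      rw [pvSplit_decomp s hm]
      by_cases ht : s.takeWhile (· ≠ '\n') = []
      · rw [ht]
        simp
      · have hdne : s.dropWhile (· ≠ '\n') ≠ [] := by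
          intro hnil
          have := List.dropWhile_eq_nil_iff.mp hnil '\n' hm
          simp at this
        have hlen : (s.dropWhile (· ≠ '\n')).tail.length ≤ n := by
          have h1 : (s.takeWhile (· ≠ '\n')).length + (s.dropWhile (· ≠ '\n')).length = s.length := by
            rw [← List.length_append, List.takeWhile_append_dropWhile]
          have h2 : 0 < (s.dropWhile (· ≠ '\n')).length := List.length_pos_iff.mpr hdne
          simp only [List.length_tail]
          omega
        have ihd := ih ((s.dropWhile (· ≠ '\n')).tail) hlen
        obtain ⟨c, cs, hcs⟩ := List.exists_cons_of_ne_nil ht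
        have hget : PySem.List.pyGet? (s.takeWhile (· ≠ '\n')) 0 = some c := by
          rw [hcs]; exact PySem.List.pyGet?_zero_cons ..
        have hne : String.ofList (s.takeWhile (· ≠ '\n')) ≠ "" := pvOfList_ne_empty _ ht
        have hget' : PySem.List.pyGet? (s.takeWhile (fun x => !decide (x = '\n'))) 0 = some c := by
          simpa only [decide_not] using hget
        rw [if_neg ht, hget]
        by_cases hc : c = '1'
        · subst hc
          rw [if_pos (by decide)]
          rw [List.map_cons]
          rw [List.takeWhile_cons_of_pos (by simpa using hne)]
          rw [List.filter_cons_of_pos (by simp [PySem.Str.pyGet?]; exact hget')]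
          rw [ihd]
        · rw [if_neg (by simp [hc])]
          rw [List.map_cons]
          rw [List.takeWhile_cons_of_pos (by simpa using hne)]
          rw [List.filter_cons_of_neg (by simp [PySem.Str.pyGet?]; intro h; exact hc (Option.some_inj.mp ((hget'.symm.trans h))))]
          exact ihd
    · have hfind : PySem.Chars.find s ['\n'] = -1 := (pvFind_neg_iff s).mpr hm
      rw [pvGoB, dif_pos hfind]
      rw [pvSplit_no s hm]
      cases s with
      | nil => simp
      | cons c cs =>
        have hget : PySem.List.pyGet? (c :: cs) 0 = some c := PySem.List.pyGet?_zero_cons ..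
        have hne : String.ofList (c :: cs) ≠ "" := pvOfList_ne_empty _ (by simp)
        by_cases hc : c = '1'
        · simp [hc, PySem.Str.pyGet?]
        · simp [hc, PySem.Str.pyGet?]

theorem pvGoB_eq (s : List Char) :
    pvGoB s = (((pvSplit s).map String.ofList).takeWhile (fun l => l ≠ "")).filter
      (fun l => PySem.Str.pyGet? l 0 == some '1') :=
  pvGoB_eq_aux s.length s le_rfl

-- ===== VERDICT =====
theorem listify_each_record_spec : Claim_equal_listify_each_record := by
  intro text _
  unfold Spec_listify_each_record listify_each_record listify_each_record_alt
  rw [pvGoB_eq]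
  have hsplit : (PySem.Str.split? text "\n").getD []
      = (pvSplit text.toList).map String.ofList := by
    simp [PySem.Str.split?, PySem.Chars.split?, pvSplitOn_eq]
  rw [hsplit, pvLoopA_eq]
  simp
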